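-- pv_equiv track=rewrite | github.com/EjsalasV/Socio-Inteligente | backend/routes/risk_engine.py | _map_area_for_account
-- ===== SOURCE A (Python) =====
-- from typing import Any
--
-- def _normalize_code(value: Any) -> str:
--     raw = str(value or "").strip()
--     if not raw:
--         return ""
--     if raw.endswith(".0"):
--         raw = raw[:-2]
--     return raw
--
-- def _map_area_for_account(account_code: str, code_to_area: dict[str, str]) -> str:
--     code = _normalize_code(account_code)
--     if not code:
--         return ""
--     if code in code_to_area:
--         return code_to_area[code]
--     prefixes = sorted(code_to_area.keys(), key=len, reverse=True)
--     for key in prefixes: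
--         if code.startswith(key) or key.startswith(code):
--             return code_to_area[key]
--     return ""
-- ===== SOURCE B (Python) =====
-- def _map_area_for_account(account_code: str, code_to_area: dict[str, str]) -> str:
--     code = (account_code or "").strip().removesuffix(".0")
--     if not code:
--         return ""
--     best_key = None
--     best_val = ""
--     for key, val in code_to_area.items():
--         if key == code:
--             return val
--         if code.startswith(key) or key.startswith(code):
--             if best_key is None or len(key) > len(best_key):
--                 best_key, best_val = key, val
--     return best_val
-- ===== Notes on version B (the rewrite author's own statement) =====
-- stated objective: alternative
-- what changed: B replaces A's sort-all-keys-by-length-then-scan prefix matching with a single pass over the dict that keeps the longest matching key seen so far (earliest wins on ties, exact key returns immediately); O(n) scan instead of O(n log n) sort, though the difference was not measurable at the tested sizes.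
import Mathlib
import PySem

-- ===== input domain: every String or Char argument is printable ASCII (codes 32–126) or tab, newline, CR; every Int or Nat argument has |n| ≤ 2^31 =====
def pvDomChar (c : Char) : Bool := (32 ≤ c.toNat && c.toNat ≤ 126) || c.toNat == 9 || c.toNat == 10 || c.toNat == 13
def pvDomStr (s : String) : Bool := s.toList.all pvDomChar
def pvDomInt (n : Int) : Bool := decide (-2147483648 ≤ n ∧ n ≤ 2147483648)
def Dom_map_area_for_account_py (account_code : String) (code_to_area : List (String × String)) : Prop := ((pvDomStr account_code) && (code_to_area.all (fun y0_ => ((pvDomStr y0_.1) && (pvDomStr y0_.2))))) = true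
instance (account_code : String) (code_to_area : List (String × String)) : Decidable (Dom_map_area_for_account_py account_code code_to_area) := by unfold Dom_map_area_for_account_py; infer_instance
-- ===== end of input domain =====

-- B replaces A's sort-all-keys-then-scan prefix matching by a single pass over the dict
-- that keeps the longest matching key seen so far (earliest wins on ties).

-- ===== PORT A =====
def normalize_code_py (value : String) : String :=
  let raw := PySem.Str.strip value
  if raw = "" then ""
  else if PySem.Str.endswith raw ".0" then PySem.Str.slice raw none (some (-2))
  else raw

-- code_to_area[k] for a key k known to be present (dict lookup = first match in the assoc list)
def pyDictGetFirst (d : List (String × String)) (k : String) : String :=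
  match d.find? (fun kv => kv.1 == k) with
  | some kv => kv.2
  | none => ""

def aPrefixLoop (code : String) (d : List (String × String)) : List String → String
  | [] => ""
  | key :: rest =>
    if PySem.Str.startswith code key || PySem.Str.startswith key code then pyDictGetFirst d key
    else aPrefixLoop code d rest

def map_area_for_account_py (account_code : String) (code_to_area : List (String × String)) : String :=
  let code := normalize_code_py account_code
  if code = "" then ""
  else if code_to_area.any (fun kv => kv.1 == code) then pyDictGetFirst code_to_area code
  else
    let prefixes := PySem.List.sorted (code_to_area.map Prod.fst) PySem.Str.len true
    aPrefixLoop code code_to_area prefixes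

-- ===== PORT B =====
def normalize_code_alt (value : String) : String :=
  let raw := PySem.Str.strip value
  if PySem.Str.endswith raw ".0" then PySem.Str.slice raw none (some (-2)) else raw

def bestScan (code : String) : Option (String × String) → List (String × String) → String
  | best, [] => match best with | some kv => kv.2 | none => ""
  | best, (k, v) :: rest =>
    if k == code then v
    else if PySem.Str.startswith code k || PySem.Str.startswith k code then
      if (match best with | none => true | some bk => decide (PySem.Str.len bk.1 < PySem.Str.len k)) then
        bestScan code (some (k, v)) rest
      else bestScan code best rest
    else bestScan code best rest

def map_area_for_account_py_alt (account_code : String) (code_to_area : List (String × String)) : String :=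
  let code := normalize_code_alt account_code
  if code = "" then "" else bestScan code none code_to_area

-- ===== PRECONDITION & SPEC =====
def Spec_map_area_for_account_py (account_code : String) (code_to_area : List (String × String)) (out : String) : Prop := out = map_area_for_account_py_alt account_code code_to_area
instance (account_code : String) (code_to_area : List (String × String)) (out : String) : Decidable (Spec_map_area_for_account_py account_code code_to_area out) := by unfold Spec_map_area_for_account_py; infer_instance

-- ===== CLAIM (what is proved, stated in full; the proofs are below) =====
def Claim_equal_map_area_for_account_py : Prop := ∀ (account_code : String) (code_to_area : List (String × String)), Dom_map_area_for_account_py account_code code_to_area → Spec_map_area_for_account_py account_code code_to_area (map_area_for_account_py account_code code_to_area)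

-- ===== LEMMAS AND PROOFS =====

-- the prefix-match predicate (depends only on the key)
def pvP (code k : String) : Bool := PySem.Str.startswith code k || PySem.Str.startswith k code

-- key-level single step of the longest-match scan
def pvStepK (code : String) (b : Option String) (k : String) : Option String :=
  if pvP code k && (match b with | none => true | some bb => decide (PySem.Str.len bb < PySem.Str.len k)) then some k else b

-- entry-level single step
def pvStepE (code : String) (b : Option (String × String)) (kv : String × String) : Option (String × String) :=
  if pvP code kv.1 && (match b with | none => true | some bb => decide (PySem.Str.len bb.1 < PySem.Str.len kv.1)) then some kv else b

def pvDesc (a b : String) : Prop := PySem.Str.len b ≤ PySem.Str.len a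

def pvBef (a b : String) : Bool := decide (PySem.Str.len b < PySem.Str.len a)

theorem pv_insertBy_cons (bef : String → String → Bool) (x y : String) (ys : List String) :
    PySem.List.insertBy bef x (y :: ys) = if bef x y then x :: y :: ys else y :: PySem.List.insertBy bef x ys := rfl

theorem pv_head_bound (y : String) (ys : List String) (k : String)
    (h : (y :: ys).Pairwise pvDesc) (hm : k ∈ y :: ys) : PySem.Str.len k ≤ PySem.Str.len y := by
  rcases List.mem_cons.mp hm with rfl | hm
  · exact le_refl _
  · exact (List.pairwise_cons.mp h).1 k hm

theorem pv_insertBy_pairwise (x : String) (acc : List String)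
    (h : acc.Pairwise pvDesc) : (PySem.List.insertBy pvBef x acc).Pairwise pvDesc := by
  induction acc with
  | nil => simp [PySem.List.insertBy, pvDesc]
  | cons y ys ih =>
    obtain ⟨hy, hys⟩ := List.pairwise_cons.mp h
    rw [pv_insertBy_cons]
    by_cases hb : pvBef x y = true
    · rw [if_pos hb]
      have hlt : PySem.Str.len y < PySem.Str.len x := of_decide_eq_true hb
      refine List.pairwise_cons.mpr ⟨?_, h⟩
      intro z hz
      rcases List.mem_cons.mp hz with rfl | hz
      · exact le_of_lt hlt
      · exact le_trans (hy z hz) (le_of_lt hlt)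
    · rw [if_neg hb]
      have hle : PySem.Str.len x ≤ PySem.Str.len y := by
        have := of_decide_eq_false (Bool.eq_false_iff.mpr hb)
        omega
      refine List.pairwise_cons.mpr ⟨?_, ih hys⟩
      intro z hz
      rcases (PySem.List.mem_insertBy _ _ _ _).mp hz with rfl | hz
      · exact hle
      · exact hy z hz

theorem pv_find_insertBy (code x : String) (acc : List String)
    (h : acc.Pairwise pvDesc) :
    (PySem.List.insertBy pvBef x acc).find? (pvP code) = pvStepK code (acc.find? (pvP code)) x := by
  induction acc with
  | nil =>
    by_cases hx : pvP code x = true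
    · simp [PySem.List.insertBy, pvStepK, hx]
    · simp [PySem.List.insertBy, pvStepK, hx]
  | cons y ys ih =>
    obtain ⟨hy, hys⟩ := List.pairwise_cons.mp h
    rw [pv_insertBy_cons]
    by_cases hb : pvBef x y = true
    · rw [if_pos hb]
      have hlt : PySem.Str.len y < PySem.Str.len x := of_decide_eq_true hb
      by_cases hx : pvP code x = true
      · rw [List.find?_cons_of_pos hx]
        cases hfy : (y :: ys).find? (pvP code) with
        | none => simp [pvStepK, hx]
        | some kk =>
          have hk : PySem.Str.len kk ≤ PySem.Str.len y :=
            pv_head_bound y ys kk h (List.mem_of_find?_eq_some hfy)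
          have hd : decide (PySem.Str.len kk < PySem.Str.len x) = true :=
            decide_eq_true (lt_of_le_of_lt hk hlt)
          have hcond : (pvP code x && decide (PySem.Str.len kk < PySem.Str.len x)) = true := by
            rw [hx, hd]; rfl
          dsimp only [pvStepK]
          rw [if_pos hcond]
      · rw [List.find?_cons_of_neg hx]
        cases hfy : (y :: ys).find? (pvP code) with
        | none => simp [pvStepK, hx]
        | some kk => simp [pvStepK, hx]
    · rw [if_neg hb]
      have hnlt : ¬ (PySem.Str.len y < PySem.Str.len x) := of_decide_eq_false (Bool.eq_false_iff.mpr hb)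
      by_cases hyP : pvP code y = true
      · rw [List.find?_cons_of_pos hyP, List.find?_cons_of_pos hyP]
        have hd : decide (PySem.Str.len y < PySem.Str.len x) = false := decide_eq_false hnlt
        have hcond : (pvP code x && decide (PySem.Str.len y < PySem.Str.len x)) = false := by
          rw [hd, Bool.and_false]
        dsimp only [pvStepK]
        rw [if_neg (Bool.eq_false_iff.mp hcond)]
      · rw [List.find?_cons_of_neg hyP, List.find?_cons_of_neg hyP, ih hys]

theorem pv_find_foldl (code : String) (ks : List String) (acc : List String)
    (h : acc.Pairwise pvDesc) :
    ((ks.foldl (fun a x => PySem.List.insertBy pvBef x a) acc).find? (pvP code))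
      = ks.foldl (pvStepK code) (acc.find? (pvP code)) := by
  induction ks generalizing acc with
  | nil => simp
  | cons x ks ih =>
    simp only [List.foldl_cons]
    rw [ih _ (pv_insertBy_pairwise x acc h), pv_find_insertBy code x acc h]

theorem pv_map_fst_foldl (code : String) (l : List (String × String)) (b : Option (String × String)) :
    (l.foldl (pvStepE code) b).map Prod.fst = (l.map Prod.fst).foldl (pvStepK code) (b.map Prod.fst) := by
  induction l generalizing b with
  | nil => simp
  | cons kv l ih =>
    simp only [List.foldl_cons, List.map_cons]
    rw [ih]
    have hstep : (pvStepE code b kv).map Prod.fst = pvStepK code (b.map Prod.fst) kv.1 := by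
      cases b <;> dsimp only [pvStepE, pvStepK, Option.map] <;> split_ifs <;> rfl
    rw [hstep]

theorem pvStepE_cases (code : String) (b : Option (String × String)) (kv : String × String) :
    (pvStepE code b kv = some kv ∧ pvP code kv.1 = true ∧ ∀ bb, b = some bb → PySem.Str.len bb.1 < PySem.Str.len kv.1)
    ∨ (pvStepE code b kv = b ∧ (pvP code kv.1 = false ∨ ∃ bb, b = some bb ∧ ¬ PySem.Str.len bb.1 < PySem.Str.len kv.1)) := by
  cases b with
  | none =>
    by_cases hp : pvP code kv.1 = true
    · refine Or.inl ⟨?_, hp, ?_⟩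
      · dsimp only [pvStepE]; exact if_pos (by rw [hp]; decide)
      · intro bb hbb; cases hbb
    · have hp' : pvP code kv.1 = false := Bool.eq_false_iff.mpr hp
      refine Or.inr ⟨?_, Or.inl hp'⟩
      dsimp only [pvStepE]; exact if_neg (by intro hc; rw [hp'] at hc; simp at hc)
  | some bb =>
    by_cases hp : pvP code kv.1 = true
    · by_cases hl : PySem.Str.len bb.1 < PySem.Str.len kv.1
      · refine Or.inl ⟨?_, hp, ?_⟩
        · dsimp only [pvStepE]; exact if_pos (by rw [hp, decide_eq_true hl]; decide)
        · intro bb' hbb; rw [Option.some.inj hbb] at hl; exact hl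
      · refine Or.inr ⟨?_, Or.inr ⟨bb, rfl, hl⟩⟩
        dsimp only [pvStepE]
        exact if_neg (by intro hc; rw [decide_eq_false hl, Bool.and_false] at hc; exact Bool.false_ne_true hc)
    · have hp' : pvP code kv.1 = false := Bool.eq_false_iff.mpr hp
      refine Or.inr ⟨?_, Or.inl hp'⟩
      dsimp only [pvStepE]; exact if_neg (by intro hc; rw [hp'] at hc; simp at hc)

theorem pv_foldl_first_occ (code : String) (l : List (String × String)) (b : Option (String × String))
    (e : String × String) (h : l.foldl (pvStepE code) b = some e) :
    b = some e ∨ (pvP code e.1 = true ∧ (∀ bb, b = some bb → PySem.Str.len bb.1 < PySem.Str.len e.1) ∧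
      ∃ l₁ l₂, l = l₁ ++ e :: l₂ ∧ ∀ kv ∈ l₁, PySem.Str.len kv.1 < PySem.Str.len e.1 ∨ pvP code kv.1 = false) := by
  induction l generalizing b with
  | nil =>
    simp only [List.foldl_nil] at h
    exact Or.inl h
  | cons kv l ih =>
    simp only [List.foldl_cons] at h
    rcases ih _ h with h1 | ⟨hP, hbrel, l₁, l₂, hsplit, hl₁⟩
    · rcases pvStepE_cases code b kv with ⟨hs, hp, hb⟩ | ⟨hs, _⟩
      · rw [hs] at h1
        obtain rfl := Option.some.inj h1
        exact Or.inr ⟨hp, hb, [], l, rfl, by simp⟩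
      · rw [hs] at h1
        exact Or.inl h1
    · refine Or.inr ⟨hP, ?_, kv :: l₁, l₂, by rw [hsplit]; rfl, ?_⟩
      · intro bb hbb
        subst hbb
        rcases pvStepE_cases code (some bb) kv with ⟨hs, _, hb⟩ | ⟨hs, _⟩
        · exact lt_trans (hb bb rfl) (hbrel kv hs)
        · exact hbrel bb hs
      · intro z hz
        rcases List.mem_cons.mp hz with rfl | hz
        · rcases pvStepE_cases code b z with ⟨hs, _, _⟩ | ⟨hs, hreason⟩
          · exact Or.inl (hbrel z hs)
          · rcases hreason with hp | ⟨bb, hbb, hnl⟩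
            · exact Or.inr hp
            · exact Or.inl (lt_of_le_of_lt (not_lt.mp hnl) (hbrel bb (hs.trans hbb)))
        · exact hl₁ z hz

theorem pv_bestScan_exact (code : String) (l : List (String × String))
    (h : l.any (fun kv => kv.1 == code) = true) (b : Option (String × String)) :
    bestScan code b l = pyDictGetFirst l code := by
  induction l generalizing b with
  | nil => simp at h
  | cons kv rest ih =>
    obtain ⟨k, v⟩ := kv
    by_cases hk : (k == code) = true
    · simp only [bestScan]
      rw [if_pos hk]
      simp [pyDictGetFirst, hk]
    · have hk' : ¬ (k == code) = true := hk
      have hrest : rest.any (fun kv => kv.1 == code) = true := by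
        simp only [List.any_cons] at h
        rcases Bool.or_eq_true_iff.mp h with h1 | h1
        · exact absurd h1 hk'
        · exact h1
      have hfind : pyDictGetFirst ((k, v) :: rest) code = pyDictGetFirst rest code := by
        simp only [pyDictGetFirst, List.find?_cons]
        rw [Bool.eq_false_iff.mpr hk']
      simp only [bestScan]
      rw [if_neg hk', hfind]
      split_ifs <;> exact ih hrest _

theorem pv_bestScan_noexact (code : String) (l : List (String × String))
    (h : ∀ kv ∈ l, kv.1 ≠ code) (b : Option (String × String)) :
    bestScan code b l = (match l.foldl (pvStepE code) b with | some e => e.2 | none => "") := by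
  induction l generalizing b with
  | nil => simp [bestScan]
  | cons kv rest ih =>
    obtain ⟨k, v⟩ := kv
    have hk : ¬ ((k == code) = true) := by
      simpa using h (k, v) (List.mem_cons_self ..)
    have hrest : ∀ kv ∈ rest, kv.1 ≠ code := fun kv hm => h kv (List.mem_cons_of_mem _ hm)
    simp only [bestScan, List.foldl_cons]
    rw [if_neg hk]
    by_cases hp : (PySem.Str.startswith code k || PySem.Str.startswith k code) = true
    · rw [if_pos hp]
      by_cases hb : (match b with | none => true | some bk => decide (PySem.Str.len bk.1 < PySem.Str.len k)) = true
      · rw [if_pos hb, ih hrest _]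
        have hc : pvStepE code b (k, v) = some (k, v) := by
          simp only [pvStepE]
          exact if_pos (Bool.and_eq_true_iff.mpr ⟨hp, hb⟩)
        rw [hc]
      · rw [if_neg hb, ih hrest _]
        have hc : pvStepE code b (k, v) = b := by
          simp only [pvStepE]
          exact if_neg (by simp only [Bool.and_eq_true, not_and]; intro _ hbb; exact hb hbb)
        rw [hc]
    · rw [if_neg hp, ih hrest _]
      have hc : pvStepE code b (k, v) = b := by
        simp only [pvStepE]
        exact if_neg (by simp only [Bool.and_eq_true, not_and]; intro hpp; exact absurd hpp (by simpa [pvP] using hp))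
      rw [hc]

theorem pv_aPrefixLoop_find (code : String) (d : List (String × String)) (s : List String) :
    aPrefixLoop code d s = (match s.find? (pvP code) with | some k => pyDictGetFirst d k | none => "") := by
  induction s with
  | nil => simp [aPrefixLoop]
  | cons k rest ih =>
    simp only [aPrefixLoop]
    by_cases h : (PySem.Str.startswith code k || PySem.Str.startswith k code) = true
    · rw [if_pos h, List.find?_cons_of_pos (show pvP code k = true from h)]
    · rw [if_neg h, List.find?_cons_of_neg (show ¬ pvP code k = true from h), ih]

theorem pv_normalize_eq (v : String) : normalize_code_py v = normalize_code_alt v := by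
  simp only [normalize_code_py, normalize_code_alt]
  by_cases h : PySem.Str.strip v = ""
  · rw [if_pos h, h]; decide
  · rw [if_neg h]

-- ===== VERDICT (by name: the statement is the Claim_ definition above) =====
theorem map_area_for_account_py_spec : Claim_equal_map_area_for_account_py := by
  intro account_code l _hdom
  unfold Spec_map_area_for_account_py
  simp only [map_area_for_account_py, map_area_for_account_py_alt, pv_normalize_eq]
  by_cases h0 : normalize_code_alt account_code = ""
  · rw [if_pos h0, if_pos h0]
  · rw [if_neg h0, if_neg h0]
    by_cases hex : l.any (fun kv => kv.1 == normalize_code_alt account_code) = true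
    · rw [if_pos hex, pv_bestScan_exact _ _ hex]
    · rw [if_neg hex]
      have hnoex : ∀ kv ∈ l, kv.1 ≠ normalize_code_alt account_code := by
        intro kv hm heq
        exact (Bool.eq_false_iff.mp (Bool.eq_false_iff.mpr hex)) (List.any_eq_true.mpr ⟨kv, hm, by simp [heq]⟩)
      rw [pv_bestScan_noexact _ _ hnoex, pv_aPrefixLoop_find]
      rw [PySem.List.sorted_rev_eq_foldl_insertBy]
      have hbef : (fun (a b : String) => decide (PySem.Str.len b < PySem.Str.len a)) = pvBef := rfl
      rw [hbef, pv_find_foldl _ _ _ List.Pairwise.nil]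
      simp only [List.find?_nil]
      have hmf := pv_map_fst_foldl (normalize_code_alt account_code) l none
      simp only [Option.map_none] at hmf
      rw [← hmf]
      cases hbe : l.foldl (pvStepE (normalize_code_alt account_code)) none with
      | none => simp
      | some e =>
        simp only [Option.map_some]
        rcases pv_foldl_first_occ _ _ _ _ hbe with h1 | ⟨hP, _, l₁, l₂, hsplit, hl₁⟩
        · exact absurd h1 (by simp)
        · subst hsplit
          have hfind1 : l₁.find? (fun kv => kv.1 == e.1) = none := by
            rw [List.find?_eq_none]
            intro kv hm hkv
            have hkey : kv.1 = e.1 := by simpa using hkv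
            rcases hl₁ kv hm with hlt | hpf
            · rw [hkey] at hlt; exact absurd hlt (lt_irrefl _)
            · rw [hkey] at hpf; rw [hpf] at hP; exact Bool.false_ne_true hP
          simp only [pyDictGetFirst, List.find?_append, hfind1, Option.none_or]
          rw [List.find?_cons_of_pos (by simp)]
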